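-- pv_equiv track=rewrite | github.com/ditthales/ListasIP | funcoes e escopo de variaveis/23.1L4Q5 - Mergulhão no Espaço.py | monta_matriz
-- ===== SOURCE A (Python) =====
-- def monta_matriz(coordenada_X, coordenada_Y):
--     componente_X = coordenada_X
--     componente_Y = coordenada_Y * 7
--     coordenada_geral = componente_X + componente_Y
--     matriz = ""
--     for index in range(7*7):
--         if index == coordenada_geral:
--             matriz += "☆ "
--         else:
--             matriz += ". "
--         if (index + 1) % 7 == 0 and index != 49:
--             matriz = matriz[:-1]
--             matriz += "\n"
--     matriz = matriz[:-1]
--     return matriz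
-- ===== SOURCE B (Python) =====
-- def monta_matriz(coordenada_X, coordenada_Y):
--     coordenada_geral = coordenada_X + coordenada_Y * 7
--     return "\n".join(
--         " ".join("☆" if linha * 7 + coluna == coordenada_geral else "."
--                  for coluna in range(7))
--         for linha in range(7))
-- ===== Notes on version B (the rewrite author's own statement) =====
-- stated objective: simpler
-- what changed: A builds one 49-token string in a single flat loop, repeatedly appending tokens and repairing the trailing space via slicing matriz[:-1] at each row boundary and at the end; B builds each of the 7 rows as a ' '-join over columns and joins the rows with ' ', comparing the linear index linha*7+coluna against the same coordenada_geral, so no slicing or patch-back is needed.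
import Mathlib
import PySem

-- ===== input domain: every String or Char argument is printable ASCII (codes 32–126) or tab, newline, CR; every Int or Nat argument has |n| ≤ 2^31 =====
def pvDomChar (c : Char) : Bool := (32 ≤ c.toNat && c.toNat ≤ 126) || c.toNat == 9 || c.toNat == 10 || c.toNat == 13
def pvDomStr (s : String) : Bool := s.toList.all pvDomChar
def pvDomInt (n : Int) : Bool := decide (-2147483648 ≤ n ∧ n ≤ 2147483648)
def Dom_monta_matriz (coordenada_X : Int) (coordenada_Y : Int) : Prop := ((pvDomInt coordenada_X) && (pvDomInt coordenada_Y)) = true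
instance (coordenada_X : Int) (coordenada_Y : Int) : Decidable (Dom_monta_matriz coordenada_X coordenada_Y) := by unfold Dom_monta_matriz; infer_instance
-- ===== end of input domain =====

-- B replaces A's single 49-step loop with slice/patch-back repairs by a nested row/column
-- comprehension joined with " " and "\n" (objective: simpler; same behaviour, including out-of-range coordinates).

-- ===== PORT A =====
-- A's loop, transliterated on List Char (strings ported through PySem.Chars as the convention requires)
def monta_matriz (coordenada_X : Int) (coordenada_Y : Int) : String :=
  let componente_X := coordenada_X
  let componente_Y := coordenada_Y * 7
  let coordenada_geral := componente_X + componente_Y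
  let matriz : List Char :=
    (PySem.List.pyRange 0 (7*7) 1).foldl (fun matriz index =>
      let matriz := matriz ++ (if index == coordenada_geral then "☆ ".toList else ". ".toList)
      if PySem.Int.mod (index + 1) 7 == 0 && index != 49 then
        (PySem.List.slice matriz none (some (-1))) ++ "\n".toList
      else matriz) []
  String.ofList (PySem.List.slice matriz none (some (-1)))

-- ===== PORT B =====
def monta_matriz_alt (coordenada_X : Int) (coordenada_Y : Int) : String :=
  let coordenada_geral := coordenada_X + coordenada_Y * 7
  String.ofList (PySem.Chars.join "\n".toList
    ((PySem.List.pyRange 0 7 1).map (fun linha =>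
      PySem.Chars.join " ".toList
        ((PySem.List.pyRange 0 7 1).map (fun coluna =>
          if linha * 7 + coluna == coordenada_geral then "☆".toList else ".".toList)))))

-- ===== PRECONDITION & SPEC =====
def Spec_monta_matriz (coordenada_X : Int) (coordenada_Y : Int) (out : String) : Prop := out = monta_matriz_alt coordenada_X coordenada_Y
instance (coordenada_X : Int) (coordenada_Y : Int) (out : String) : Decidable (Spec_monta_matriz coordenada_X coordenada_Y out) := by unfold Spec_monta_matriz; infer_instance

-- ===== CLAIM (what is proved, stated in full; the proofs are below) =====
def Claim_equal_monta_matriz : Prop := ∀ (coordenada_X : Int) (coordenada_Y : Int), Dom_monta_matriz coordenada_X coordenada_Y → Spec_monta_matriz coordenada_X coordenada_Y (monta_matriz coordenada_X coordenada_Y)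

-- ===== LEMMAS AND PROOFS =====

-- A's body as a function of the linear coordinate only
def pvA (g : Int) : String :=
  let matriz : List Char :=
    (PySem.List.pyRange 0 (7*7) 1).foldl (fun matriz index =>
      let matriz := matriz ++ (if index == g then "☆ ".toList else ". ".toList)
      if PySem.Int.mod (index + 1) 7 == 0 && index != 49 then
        (PySem.List.slice matriz none (some (-1))) ++ "\n".toList
      else matriz) []
  String.ofList (PySem.List.slice matriz none (some (-1)))

def pvB (g : Int) : String :=
  String.ofList (PySem.Chars.join "\n".toList
    ((PySem.List.pyRange 0 7 1).map (fun linha =>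
      PySem.Chars.join " ".toList
        ((PySem.List.pyRange 0 7 1).map (fun coluna =>
          if linha * 7 + coluna == g then "☆".toList else ".".toList)))))

theorem pvA_eq (x y : Int) : monta_matriz x y = pvA (x + y * 7) := rfl
theorem pvB_eq (x y : Int) : monta_matriz_alt x y = pvB (x + y * 7) := rfl

theorem pvA_out {g : Int} (h : g < 0 ∨ 48 < g) : pvA g = pvA 49 := by
  unfold pvA
  rw [PySem.List.foldl_congr_mem (g := fun matriz index =>
      let matriz := matriz ++ (if index == (49 : Int) then "☆ ".toList else ". ".toList)
      if PySem.Int.mod (index + 1) 7 == 0 && index != 49 then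
        (PySem.List.slice matriz none (some (-1))) ++ "\n".toList
      else matriz)]
  intro acc i hi
  rw [PySem.List.mem_pyRange_one] at hi
  have h1 : (i == g) = false := by simp; omega
  have h2 : (i == (49 : Int)) = false := by simp; omega
  simp only [h1, h2]

theorem pvB_out {g : Int} (h : g < 0 ∨ 48 < g) : pvB g = pvB 49 := by
  unfold pvB
  congr 2
  apply List.map_congr_left
  intro l hl
  rw [PySem.List.mem_pyRange_one] at hl
  congr 1
  apply List.map_congr_left
  intro c hc
  rw [PySem.List.mem_pyRange_one] at hc
  have h1 : (l * 7 + c == g) = false := by simp; omega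
  have h2 : (l * 7 + c == (49 : Int)) = false := by simp; omega
  rw [h1, h2]

set_option maxRecDepth 8192 in
theorem pvAB (g : Int) : pvA g = pvB g := by
  by_cases h : 0 ≤ g ∧ g ≤ 48
  · obtain ⟨h1, h2⟩ := h
    interval_cases g <;> decide
  · rw [pvA_out (by omega), pvB_out (by omega)]
    decide

-- ===== VERDICT (by name: the statement is the Claim_ definition above) =====
theorem monta_matriz_spec : Claim_equal_monta_matriz := by
  intro x y _
  unfold Spec_monta_matriz
  rw [pvA_eq, pvB_eq, pvAB]
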